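-- pv_equiv track=rewrite | github.com/daviH98/Mapeamento-Memoria-Cache | src/cache_substituicao.py | simular_mru
-- ===== SOURCE A (Python) =====
-- from typing import List
--
-- def simular_mru(sequencia: List[int], quadros: int) -> List[int]:
--     memoria = [None] * quadros
--     ultima_vez_usado = {}
--     tempo = 0
--     for pagina in sequencia:
--         tempo += 1
--         if pagina in memoria:
--             # Atualiza o tempo da página mais recente
--             ultima_vez_usado[pagina] = tempo
--         else:
--             if None in memoria:
--                 # Adiciona página se ainda há espaço
--                 pos = memoria.index(None)
--                 memoria[pos] = pagina
--                 ultima_vez_usado[pagina] = tempo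
--             else:
--                 # Remove a página usada mais recentemente
--                 pagina_mru = max(ultima_vez_usado, key=ultima_vez_usado.get)
--                 pos = memoria.index(pagina_mru)
--                 del ultima_vez_usado[pagina_mru]
--                 memoria[pos] = pagina
--                 ultima_vez_usado[pagina] = tempo
--     return memoria
-- ===== SOURCE B (Python) =====
-- from typing import List
--
-- def simular_mru(sequencia: List[int], quadros: int) -> List[int]:
--     # MRU victim = the page with the greatest last-use time = the page accessed
--     # most recently, so a single variable replaces A's timestamp dict + max scan,
--     # and a page->slot dict replaces A's list.index scans: one O(1) step per access.
--     memoria = [None] * quadros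
--     pos_de = {}
--     mru = None
--     for pagina in sequencia:
--         if pagina in pos_de:
--             mru = pagina
--         elif len(pos_de) < quadros:
--             p = len(pos_de)
--             memoria[p] = pagina
--             pos_de[pagina] = p
--             mru = pagina
--         else:
--             p = pos_de.pop(mru)
--             memoria[p] = pagina
--             pos_de[pagina] = p
--             mru = pagina
--     return memoria
-- ===== Notes on version B (the rewrite author's own statement) =====
-- stated objective: faster
-- what changed: B drops A's timestamp dict, per-miss max() scan and list.index scans entirely: since the MRU victim is simply the page accessed last, B keeps one last-accessed variable plus a page-to-slot dict, doing O(1) work per access.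
import Mathlib
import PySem

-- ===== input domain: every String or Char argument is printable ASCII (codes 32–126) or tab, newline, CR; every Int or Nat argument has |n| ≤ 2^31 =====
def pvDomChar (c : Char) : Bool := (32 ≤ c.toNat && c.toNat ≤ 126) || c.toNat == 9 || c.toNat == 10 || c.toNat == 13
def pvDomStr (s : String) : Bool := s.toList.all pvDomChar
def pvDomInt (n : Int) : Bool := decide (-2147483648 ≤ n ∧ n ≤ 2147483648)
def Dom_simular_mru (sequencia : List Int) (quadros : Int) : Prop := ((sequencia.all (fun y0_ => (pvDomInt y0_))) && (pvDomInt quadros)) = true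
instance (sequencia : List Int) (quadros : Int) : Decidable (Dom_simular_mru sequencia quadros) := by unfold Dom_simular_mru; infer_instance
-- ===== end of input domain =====

-- B replaces A's timestamp dict + per-miss max scan and list.index scans by a page→slot
-- dict and one last-accessed-page variable (the MRU victim is the page accessed last);
-- neither version mutates its arguments, so equivalence of return values is the whole story.

-- ===== PORT A =====
-- loop body of A (one access); state = (memoria, ultima_vez_usado, tempo)
def mruStepA (st : List (Option Int) × PySem.Dict Int Int × Int) (pagina : Int) :
    List (Option Int) × PySem.Dict Int Int × Int :=
  let memoria := st.1
  let ultima := st.2.1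
  let tempo := st.2.2 + 1
  if memoria.contains (some pagina) then
    (memoria, ultima.insert pagina tempo, tempo)
  else if memoria.contains none then
    let pos := (PySem.List.index? memoria none).getD 0
    (memoria.set pos (some pagina), ultima.insert pagina tempo, tempo)
  else
    let pagina_mru := (PySem.List.max? ultima.keys (fun k => ultima.getD k 0)).getD 0
    let pos := (PySem.List.index? memoria (some pagina_mru)).getD 0
    (memoria.set pos (some pagina), (ultima.erase pagina_mru).insert pagina tempo, tempo)

def simular_mru (sequencia : List Int) (quadros : Int) : List (Option Int) :=
  (sequencia.foldl mruStepA (List.replicate quadros.toNat none, PySem.Dict.empty, 0)).1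

-- ===== PORT B =====
-- loop body of B; state = (memoria, pos_de, mru)
def mruStepB (quadros : Int) (st : List (Option Int) × PySem.Dict Int Int × Option Int)
    (pagina : Int) : List (Option Int) × PySem.Dict Int Int × Option Int :=
  let memoria := st.1
  let pos_de := st.2.1
  let mru := st.2.2
  if pos_de.contains pagina then
    (memoria, pos_de, some pagina)
  else if (pos_de.size : Int) < quadros then
    let p : Int := (pos_de.size : Int)
    (memoria.set p.toNat (some pagina), pos_de.insert pagina p, some pagina)
  else
    match mru with
    | some m =>
      match pos_de.pop? m with
      | some (p, d) => (memoria.set p.toNat (some pagina), d.insert pagina p, some pagina)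
      | none => (memoria, pos_de, mru)
    | none => (memoria, pos_de, mru)

def simular_mru_alt (sequencia : List Int) (quadros : Int) : List (Option Int) :=
  (sequencia.foldl (mruStepB quadros) (List.replicate quadros.toNat none, PySem.Dict.empty, none)).1

-- ===== PRECONDITION & SPEC =====
-- Pre_ excludes only quadros ≤ 0 with nonempty sequencia: there A raises ValueError
-- (max() over the empty timestamp dict) and B raises KeyError (pop of an absent key).
def Pre_simular_mru (sequencia : List Int) (quadros : Int) : Prop :=
  sequencia = [] ∨ 1 ≤ quadros
instance (sequencia : List Int) (quadros : Int) : Decidable (Pre_simular_mru sequencia quadros) := by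
  unfold Pre_simular_mru; infer_instance

def pvWitness_simular_mru : List Int × Int := ([1, 2, 1, 3, 4, 2], 3)

def Spec_simular_mru (sequencia : List Int) (quadros : Int) (out : List (Option Int)) : Prop :=
  out = simular_mru_alt sequencia quadros
instance (sequencia : List Int) (quadros : Int) (out : List (Option Int)) :
    Decidable (Spec_simular_mru sequencia quadros out) := by
  unfold Spec_simular_mru; infer_instance

-- ===== CLAIM (what is proved, stated in full; the proofs are below) =====
def Claim_equal_simular_mru : Prop := ∀ (sequencia : List Int) (quadros : Int), Dom_simular_mru sequencia quadros → Pre_simular_mru sequencia quadros → Spec_simular_mru sequencia quadros (simular_mru sequencia quadros)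

-- ===== LEMMAS AND PROOFS =====

-- the coupling invariant between A's loop state (memA, ult, t) and B's (memB, pos, mru)
structure MruInv (quadros : Int) (memA : List (Option Int)) (ult : PySem.Dict Int Int) (t : Int)
    (memB : List (Option Int)) (pos : PySem.Dict Int Int) (mru : Option Int) : Prop where
  memEq : memA = memB
  lenEq : memA.length = quadros.toNat
  keysEq : ult.keys = pos.keys
  nodup : pos.keys.Nodup
  posOk : ∀ p ∈ pos.keys, 0 ≤ pos.getD p 0 ∧
            ∃ h : (pos.getD p 0).toNat < memA.length, memA[(pos.getD p 0).toNat] = some p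
  noneIff : ∀ i (h : i < memA.length), memA[i] = none ↔ pos.size ≤ i
  memPos : ∀ i (h : i < memA.length) p, memA[i] = some p →
            p ∈ pos.keys ∧ pos.getD p 0 = (i : Int)
  mruNone : mru = none → pos.keys = []
  mruMax : ∀ m, mru = some m → m ∈ pos.keys ∧
            ∀ q ∈ ult.keys, q ≠ m → ult.getD q 0 < ult.getD m 0
  tBound : ∀ q ∈ ult.keys, ult.getD q 0 ≤ t

lemma pvFind?_filter_ne (l : List (Int × Int)) (k x : Int) (hx : x ≠ k) :
    (l.filter (fun p => !(p.1 == k))).find? (fun p => p.1 == x) = l.find? (fun p => p.1 == x) := by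
  induction l with
  | nil => rfl
  | cons a t ih =>
    by_cases hak : a.1 = k
    · have hkx : (k == x) = false := by simp [Ne.symm hx]
      simp [hak, hkx, ih]
    · by_cases hax : a.1 = x
      · subst hax
        have hne : (a.1 == k) = false := by simpa using hak
        simp [hne]
      · simp [hak, hax, ih]

lemma pvGet?_erase_of_ne (d : PySem.Dict Int Int) (k x : Int) (hx : x ≠ k) :
    (d.erase k).get? x = d.get? x := by
  simp [PySem.Dict.get?, PySem.Dict.erase, pvFind?_filter_ne d.items k x hx]

lemma pvGetD_erase_of_ne (d : PySem.Dict Int Int) (k x : Int) (hx : x ≠ k) (d0 : Int) :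
    (d.erase k).getD x d0 = d.getD x d0 := by
  rw [PySem.Dict.getD_eq_get?_getD, PySem.Dict.getD_eq_get?_getD, pvGet?_erase_of_ne d k x hx]

lemma pvKeys_erase (d : PySem.Dict Int Int) (k : Int) :
    (d.erase k).keys = d.keys.filter (fun x => !(x == k)) := by
  simp [PySem.Dict.keys, PySem.Dict.erase, List.filter_map]; rfl

lemma pvFilter_len (l : List Int) (m : Int) (hn : l.Nodup) (hm : m ∈ l) :
    (l.filter (fun x => !(x == m))).length + 1 = l.length := by
  induction l with
  | nil => simp at hm
  | cons a t ih =>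
    rcases List.mem_cons.mp hm with h | h
    · subst h
      have hmt : m ∉ t := (List.nodup_cons.mp hn).1
      have hft : t.filter (fun x => !(x == m)) = t :=
        List.filter_eq_self.mpr (fun x hx => by
          simp only [Bool.not_eq_eq_eq_not, Bool.not_true, beq_eq_false_iff_ne]
          exact fun e => hmt (e ▸ hx))
      simp [hft]
    · have := ih (List.nodup_cons.mp hn).2 h
      have ha : a ≠ m := fun e => (List.nodup_cons.mp hn).1 (e ▸ h)
      simp [ha]; omega

lemma pvIndex?_intro (l : List (Option Int)) (v : Option Int) (k : Nat) (hk : k < l.length)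
    (h1 : l[k] = v) (h2 : ∀ j (hj : j < k), l[j]'(by omega) ≠ v) :
    PySem.List.index? l v = some k := by
  induction l generalizing k with
  | nil => simp at hk
  | cons a t ih =>
    cases k with
    | zero => simp at h1; subst h1; exact PySem.List.index?_cons_self _ _
    | succ n =>
      have ha : a ≠ v := by have := h2 0 (Nat.succ_pos n); simpa using this
      rw [PySem.List.index?_cons_of_ne _ ha]
      have := ih n (by simpa using hk) (by simpa using h1)
        (fun j hj => by have := h2 (j+1) (by omega); simpa using this)
      rw [this]; rfl

lemma pvSize_keys (d : PySem.Dict Int Int) : d.size = d.keys.length := by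
  simp [PySem.Dict.size, PySem.Dict.keys]

lemma mru_inv_step (quadros : Int) (hq : 1 ≤ quadros)
    (memA : List (Option Int)) (ult : PySem.Dict Int Int) (t : Int)
    (memB : List (Option Int)) (pos : PySem.Dict Int Int) (mru : Option Int)
    (h : MruInv quadros memA ult t memB pos mru) (pagina : Int) :
    MruInv quadros (mruStepA (memA, ult, t) pagina).1 (mruStepA (memA, ult, t) pagina).2.1
      (mruStepA (memA, ult, t) pagina).2.2
      (mruStepB quadros (memB, pos, mru) pagina).1 (mruStepB quadros (memB, pos, mru) pagina).2.1
      (mruStepB quadros (memB, pos, mru) pagina).2.2 := by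
  obtain ⟨memEq, lenEq, keysEq, nodup, posOk, noneIff, memPos, mruNone, mruMax, tBound⟩ := h
  subst memEq
  have hqn : ((quadros.toNat : Int)) = quadros := Int.toNat_of_nonneg (by omega)
  have hmemiff : (some pagina) ∈ memA ↔ pagina ∈ pos.keys := by
    constructor
    · intro hm
      obtain ⟨i, hi, hei⟩ := List.getElem_of_mem hm
      exact (memPos i hi pagina hei).1
    · intro hk
      obtain ⟨_, hlt, he⟩ := posOk pagina hk
      exact he ▸ List.getElem_mem hlt
  have hultmem : ∀ q : Int, q ∈ ult.keys ↔ q ∈ pos.keys := fun q => by rw [keysEq]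
  by_cases hit : pagina ∈ pos.keys
  · -- HIT
    have hA : memA.contains (some pagina) = true := by
      rw [List.contains_iff_mem]; exact hmemiff.2 hit
    have hB : pos.contains pagina = true := (PySem.Dict.contains_iff_mem_keys pos pagina).2 hit
    have hUc : ult.contains pagina = true :=
      (PySem.Dict.contains_iff_mem_keys ult pagina).2 ((hultmem pagina).2 hit)
    have hA' : mruStepA (memA, ult, t) pagina = (memA, ult.insert pagina (t+1), t+1) := by
      simp only [mruStepA]; rw [hA]; simp
    have hB' : mruStepB quadros (memA, pos, mru) pagina = (memA, pos, some pagina) := by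
      simp only [mruStepB]; rw [hB]; simp
    rw [hA', hB']
    dsimp only
    refine ⟨rfl, lenEq, ?_, nodup, posOk, noneIff, memPos, by simp, ?_, ?_⟩
    · rw [PySem.Dict.keys_insert_of_contains ult (t+1) hUc, keysEq]
    · intro m hm
      obtain rfl : m = pagina := by simpa using hm.symm
      refine ⟨hit, ?_⟩
      intro q hqm hne
      rw [PySem.Dict.keys_insert_of_contains ult (t+1) hUc] at hqm
      rw [PySem.Dict.getD_insert, PySem.Dict.getD_insert, if_neg hne, if_pos rfl]
      have := tBound q hqm
      omega
    · intro q hqm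
      rw [PySem.Dict.keys_insert_of_contains ult (t+1) hUc] at hqm
      rw [PySem.Dict.getD_insert]
      split_ifs
      · omega
      · have := tBound q hqm; omega
  · -- MISS
    have hnA : ¬ ((some pagina) ∈ memA) := fun hm => hit (hmemiff.1 hm)
    have hA : memA.contains (some pagina) = false := by
      rw [← Bool.not_eq_true, List.contains_iff_mem]; exact hnA
    have hB : pos.contains pagina = false := by
      rw [← Bool.not_eq_true, PySem.Dict.contains_iff_mem_keys]; exact hit
    have hUc : ult.contains pagina = false := by
      rw [← Bool.not_eq_true, PySem.Dict.contains_iff_mem_keys, hultmem]; exact hit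
    by_cases hfree : ((pos.size : Int)) < quadros
    · -- FILL
      have hszlt : pos.size < memA.length := by
        rw [lenEq]; omega
      have hnone : memA[pos.size] = none := (noneIff pos.size hszlt).2 le_rfl
      have hAn : memA.contains none = true := by
        rw [List.contains_iff_mem]; exact hnone ▸ List.getElem_mem hszlt
      have hidx : PySem.List.index? memA none = some pos.size :=
        pvIndex?_intro memA none pos.size hszlt hnone
          (fun j hj => by
            intro he
            have := (noneIff j (by omega)).1 he
            omega)
      have hA' : mruStepA (memA, ult, t) pagina =
          (memA.set pos.size (some pagina), ult.insert pagina (t+1), t+1) := by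
        have hidx2 := hidx
        simp only [PySem.List.index?_eq_idxOf?] at hidx2
        simp only [mruStepA]; rw [hA, hAn]; simp [hidx2]
      have hB' : mruStepB quadros (memA, pos, mru) pagina =
          (memA.set pos.size (some pagina), pos.insert pagina ((pos.size : Int)), some pagina) := by
        simp only [mruStepB]; rw [hB]; simp [hfree]
      rw [hA', hB']
      dsimp only
      have hkeys' : (pos.insert pagina ((pos.size : Int))).keys = pos.keys ++ [pagina] :=
        PySem.Dict.keys_insert_of_not_contains pos _ hB
      have hukeys' : (ult.insert pagina (t+1)).keys = ult.keys ++ [pagina] :=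
        PySem.Dict.keys_insert_of_not_contains ult _ hUc
      have hsz' : (pos.insert pagina ((pos.size : Int))).size = pos.size + 1 := by
        rw [PySem.Dict.size_insert, if_neg (by simp [hB])]
      refine ⟨rfl, by simpa using lenEq, ?_, ?_, ?_, ?_, ?_, by simp, ?_, ?_⟩
      · rw [hukeys', hkeys', keysEq]
      · rw [hkeys']
        refine List.Nodup.append nodup (List.nodup_singleton _) ?_
        intro x hx hx2
        obtain rfl : x = pagina := by simpa using hx2
        exact hit hx
      · -- posOk
        intro p hp
        rw [hkeys'] at hp
        rcases (List.mem_append.mp hp) with hp | hp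
        · have hne : p ≠ pagina := fun e => hit (e ▸ hp)
          rw [PySem.Dict.getD_insert, if_neg hne]
          obtain ⟨h0, hlt, he⟩ := posOk p hp
          refine ⟨h0, by simpa using hlt, ?_⟩
          have hne2 : pos.size ≠ (pos.getD p 0).toNat := by
            intro e
            have h1 : memA[pos.size]? = some none := by
              rw [List.getElem?_eq_getElem hszlt, hnone]
            have h2 : memA[(pos.getD p 0).toNat]? = some (some p) := by
              rw [List.getElem?_eq_getElem hlt, he]
            rw [e, h2] at h1
            simp at h1
          rw [List.getElem_set, if_neg hne2]
          exact he
        · obtain rfl : p = pagina := by simpa using hp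
          rw [PySem.Dict.getD_insert, if_pos rfl]
          refine ⟨by positivity, by simpa using hszlt, ?_⟩
          simp
      · -- noneIff
        intro i hi
        rw [hsz']
        rw [List.length_set] at hi
        rw [List.getElem_set]
        by_cases he : pos.size = i
        · subst he; simp
        · rw [if_neg he]
          rw [noneIff i hi]
          omega
      · -- memPos
        intro i hi p hp
        rw [List.length_set] at hi
        rw [List.getElem_set] at hp
        by_cases he : pos.size = i
        · subst he
          obtain rfl : p = pagina := by simpa using hp.symm
          rw [hkeys', PySem.Dict.getD_insert, if_pos rfl]
          simp
        · rw [if_neg he] at hp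
          obtain ⟨hk, hv⟩ := memPos i hi p hp
          have hne : p ≠ pagina := fun e => hit (e ▸ hk)
          rw [hkeys', PySem.Dict.getD_insert, if_neg hne]
          exact ⟨List.mem_append_left _ hk, hv⟩
      · -- mruMax
        intro m hm
        obtain rfl : m = pagina := by simpa using hm.symm
        refine ⟨by rw [hkeys']; simp, ?_⟩
        intro q hqm hne
        rw [hukeys'] at hqm
        rcases List.mem_append.mp hqm with hqm | hqm
        · rw [PySem.Dict.getD_insert, PySem.Dict.getD_insert, if_neg hne, if_pos rfl]
          have := tBound q hqm; omega
        · exact absurd (by simpa using hqm) hne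
      · -- tBound
        intro q hqm
        rw [hukeys'] at hqm
        rw [PySem.Dict.getD_insert]
        split_ifs
        · omega
        · rcases List.mem_append.mp hqm with hqm | hqm
          · have := tBound q hqm; omega
          · simp at hqm; omega
    · -- EVICT
      have hszge : memA.length ≤ pos.size := by
        rw [lenEq]; omega
      have hnoneA : ∀ i (hi : i < memA.length), memA[i] ≠ none := by
        intro i hi he
        have := (noneIff i hi).1 he
        omega
      have hAn : memA.contains none = false := by
        rw [← Bool.not_eq_true, List.contains_iff_mem]
        intro hm
        obtain ⟨i, hi, hei⟩ := List.getElem_of_mem hm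
        exact hnoneA i hi hei
      have hlen1 : 1 ≤ memA.length := by
        rw [lenEq]; omega
      have hkeysne : pos.keys ≠ [] := by
        intro he
        have := pvSize_keys pos
        rw [he] at this
        simp at this
        omega
      obtain ⟨m, hm⟩ : ∃ m, mru = some m := by
        cases mru with
        | none => exact absurd (mruNone rfl) hkeysne
        | some m => exact ⟨m, rfl⟩
      obtain ⟨hmK, hdom⟩ := mruMax m hm
      have hmU : m ∈ ult.keys := (hultmem m).2 hmK
      have hmax : PySem.List.max? ult.keys (fun k => ult.getD k 0) = some m := by
        cases hmx : PySem.List.max? ult.keys (fun k => ult.getD k 0) with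
        | none =>
          rw [PySem.List.max?_eq_none_iff] at hmx
          exact absurd (keysEq ▸ hmx) hkeysne
        | some m' =>
          by_cases he : m' = m
          · rw [he]
          · have h1 := PySem.List.max?_isMax hmx m hmU
            have h2 := hdom m' (PySem.List.max?_mem hmx) he
            omega
      obtain ⟨hm0, him, hEm⟩ := posOk m hmK
      have hidx : PySem.List.index? memA (some m) = some ((pos.getD m 0).toNat) :=
        pvIndex?_intro memA (some m) _ him hEm
          (fun j hj => by
            intro he
            obtain ⟨_, hv⟩ := memPos j (by omega) m he
            omega)
      obtain ⟨v, hv⟩ : ∃ v, pos.get? m = some v := by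
        cases hg : pos.get? m with
        | none => exact absurd ((PySem.Dict.get?_eq_none_iff_not_mem_keys pos m).1 hg) (by simp [hmK])
        | some v => exact ⟨v, rfl⟩
      have hvd : pos.getD m 0 = v := PySem.Dict.getD_of_get?_eq_some pos 0 hv
      have hpop : pos.pop? m = some (v, pos.erase m) := by
        simp [PySem.Dict.pop?, hv]
      have hA' : mruStepA (memA, ult, t) pagina =
          (memA.set ((pos.getD m 0).toNat) (some pagina),
            (ult.erase m).insert pagina (t+1), t+1) := by
        have hidx2 := hidx
        simp only [PySem.List.index?_eq_idxOf?] at hidx2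
        simp only [mruStepA]; rw [hA, hAn, hmax]; simp [hidx2]
      have hB' : mruStepB quadros (memA, pos, mru) pagina =
          (memA.set v.toNat (some pagina), (pos.erase m).insert pagina v, some pagina) := by
        simp only [mruStepB]; rw [hB]; simp [hfree, hm, hpop]
      rw [hA', hB', ← hvd]
      dsimp only
      -- facts about erase
      have hkerase : (pos.erase m).keys = pos.keys.filter (fun x => !(x == m)) := pvKeys_erase pos m
      have hukerase : (ult.erase m).keys = ult.keys.filter (fun x => !(x == m)) := pvKeys_erase ult m
      have hecont : (pos.erase m).contains pagina = false := by
        rw [← Bool.not_eq_true, PySem.Dict.contains_iff_mem_keys, hkerase]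
        intro hmem
        exact hit (List.mem_of_mem_filter hmem)
      have huecont : (ult.erase m).contains pagina = false := by
        rw [← Bool.not_eq_true, PySem.Dict.contains_iff_mem_keys, hukerase]
        intro hmem
        exact hit ((hultmem pagina).1 (List.mem_of_mem_filter hmem))
      have hkeys' : ((pos.erase m).insert pagina (pos.getD m 0)).keys =
          pos.keys.filter (fun x => !(x == m)) ++ [pagina] := by
        rw [PySem.Dict.keys_insert_of_not_contains _ _ hecont, hkerase]
      have hukeys' : ((ult.erase m).insert pagina (t+1)).keys =
          ult.keys.filter (fun x => !(x == m)) ++ [pagina] := by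
        rw [PySem.Dict.keys_insert_of_not_contains _ _ huecont, hukerase]
      have hsz' : ((pos.erase m).insert pagina (pos.getD m 0)).size = pos.size := by
        rw [pvSize_keys, hkeys', pvSize_keys]
        rw [List.length_append, List.length_singleton]
        exact pvFilter_len pos.keys m nodup hmK
      have hgetD' : ∀ q : Int, q ≠ pagina → q ≠ m →
          ((pos.erase m).insert pagina (pos.getD m 0)).getD q 0 = pos.getD q 0 := by
        intro q h1 h2
        rw [PySem.Dict.getD_insert, if_neg h1, pvGetD_erase_of_ne pos m q h2]
      have hugetD' : ∀ q : Int, q ≠ pagina → q ≠ m →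
          ((ult.erase m).insert pagina (t+1)).getD q 0 = ult.getD q 0 := by
        intro q h1 h2
        rw [PySem.Dict.getD_insert, if_neg h1, pvGetD_erase_of_ne ult m q h2]
      refine ⟨rfl, by simpa using lenEq, ?_, ?_, ?_, ?_, ?_, by simp, ?_, ?_⟩
      · rw [hukeys', hkeys', keysEq]
      · rw [hkeys']
        refine List.Nodup.append (List.Nodup.filter _ nodup) (List.nodup_singleton _) ?_
        intro x hx hx2
        obtain rfl : x = pagina := by simpa using hx2
        exact hit (List.mem_of_mem_filter hx)
      · -- posOk
        intro p hp
        rw [hkeys'] at hp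
        rcases List.mem_append.mp hp with hp | hp
        · have hpm : p ≠ m := by
            have := List.of_mem_filter hp
            simpa using this
          have hpk : p ∈ pos.keys := List.mem_of_mem_filter hp
          have hpp : p ≠ pagina := fun e => hit (e ▸ hpk)
          rw [hgetD' p hpp hpm]
          obtain ⟨h0, hlt, he⟩ := posOk p hpk
          refine ⟨h0, by simpa using hlt, ?_⟩
          have hne2 : (pos.getD m 0).toNat ≠ (pos.getD p 0).toNat := by
            intro e
            have h1 : memA[(pos.getD m 0).toNat]? = some (some m) := by
              rw [List.getElem?_eq_getElem him, hEm]
            have h2 : memA[(pos.getD p 0).toNat]? = some (some p) := by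
              rw [List.getElem?_eq_getElem hlt, he]
            rw [e, h2] at h1
            simp at h1
            omega
          rw [List.getElem_set, if_neg hne2]
          exact he
        · obtain rfl : p = pagina := by simpa using hp
          rw [PySem.Dict.getD_insert, if_pos rfl, hvd]
          refine ⟨hvd ▸ hm0, ?_⟩
          rw [← hvd]
          refine ⟨by simpa using him, ?_⟩
          rw [List.getElem_set, if_pos rfl]
      · -- noneIff
        intro i hi
        rw [hsz']
        rw [List.length_set] at hi
        rw [List.getElem_set]
        constructor
        · intro he
          by_cases hcase : (pos.getD m 0).toNat = i
          · rw [if_pos hcase] at he; simp at he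
          · rw [if_neg hcase] at he; exact absurd he (hnoneA i hi)
        · intro hle
          omega
      · -- memPos
        intro i hi p hp
        rw [List.length_set] at hi
        rw [List.getElem_set] at hp
        by_cases he : (pos.getD m 0).toNat = i
        · rw [if_pos he] at hp
          obtain rfl : p = pagina := by simpa using hp.symm
          rw [hkeys', PySem.Dict.getD_insert, if_pos rfl, hvd]
          refine ⟨List.mem_append_right _ (by simp), ?_⟩
          rw [← hvd, ← he]
          omega
        · rw [if_neg he] at hp
          obtain ⟨hk, hgd⟩ := memPos i hi p hp
          have hpm : p ≠ m := by
            intro e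
            subst e
            rw [hgd] at he
            omega
          have hpp : p ≠ pagina := fun e => hit (e ▸ hk)
          rw [hkeys', hgetD' p hpp hpm]
          refine ⟨List.mem_append_left _ ?_, hgd⟩
          rw [List.mem_filter]
          exact ⟨hk, by simpa using hpm⟩
      · -- mruMax
        intro m' hm'
        obtain rfl : m' = pagina := by simpa using hm'.symm
        refine ⟨by rw [hkeys']; simp, ?_⟩
        intro q hqm hne
        rw [hukeys'] at hqm
        rcases List.mem_append.mp hqm with hqm | hqm
        · have hqm2 : q ≠ m := by simpa using (List.of_mem_filter hqm)
          rw [hugetD' q hne hqm2, PySem.Dict.getD_insert, if_pos rfl]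
          have := tBound q (List.mem_of_mem_filter hqm)
          omega
        · exact absurd (by simpa using hqm) hne
      · -- tBound
        intro q hqm
        rw [hukeys'] at hqm
        rcases List.mem_append.mp hqm with hqm | hqm
        · have hqm2 : q ≠ m := by simpa using (List.of_mem_filter hqm)
          by_cases hqp : q = pagina
          · subst hqp
            rw [PySem.Dict.getD_insert, if_pos rfl]
          · rw [hugetD' q hqp hqm2]
            have := tBound q (List.mem_of_mem_filter hqm)
            omega
        · obtain rfl : q = pagina := by simpa using hqm
          rw [PySem.Dict.getD_insert, if_pos rfl]

lemma mru_inv_init (quadros : Int) :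
    MruInv quadros (List.replicate quadros.toNat none) PySem.Dict.empty 0
      (List.replicate quadros.toNat none) PySem.Dict.empty none := by
  constructor <;> simp [PySem.Dict.keys_empty, PySem.Dict.size_empty]

lemma mru_inv_fold (quadros : Int) (hq : 1 ≤ quadros) (seq : List Int) :
    ∀ (memA : List (Option Int)) (ult : PySem.Dict Int Int) (t : Int)
      (memB : List (Option Int)) (pos : PySem.Dict Int Int) (mru : Option Int),
      MruInv quadros memA ult t memB pos mru →
      MruInv quadros (seq.foldl mruStepA (memA, ult, t)).1
        (seq.foldl mruStepA (memA, ult, t)).2.1 (seq.foldl mruStepA (memA, ult, t)).2.2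
        (seq.foldl (mruStepB quadros) (memB, pos, mru)).1
        (seq.foldl (mruStepB quadros) (memB, pos, mru)).2.1
        (seq.foldl (mruStepB quadros) (memB, pos, mru)).2.2 := by
  induction seq with
  | nil => intro memA ult t memB pos mru h; simpa using h
  | cons x xs ih =>
    intro memA ult t memB pos mru h
    have h' := mru_inv_step quadros hq memA ult t memB pos mru h x
    simpa [List.foldl_cons] using
      ih (mruStepA (memA, ult, t) x).1 (mruStepA (memA, ult, t) x).2.1
        (mruStepA (memA, ult, t) x).2.2 (mruStepB quadros (memB, pos, mru) x).1
        (mruStepB quadros (memB, pos, mru) x).2.1 (mruStepB quadros (memB, pos, mru) x).2.2 h'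

-- ===== VERDICT (by name: the statement is the Claim_ definition above) =====
theorem simular_mru_spec : Claim_equal_simular_mru := by
  intro seq q _ hpre
  show simular_mru seq q = simular_mru_alt seq q
  rcases hpre with h | h
  · subst h; rfl
  · have := mru_inv_fold q h seq (List.replicate q.toNat none) PySem.Dict.empty 0
      (List.replicate q.toNat none) PySem.Dict.empty none (mru_inv_init q)
    exact this.memEq
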